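-- pv_equiv track=rewrite | github.com/JustBeYou/ctfs | pwn2win/decrypt.py | decrypt_char
-- ===== SOURCE A (Python) =====
-- def decrypt_char(char0, char1):
-- 	s3 = 0x3b9ad
--
-- 	a0 = pow(char0, 2)
-- 	s5 = a0
-- 	s2 = 7
-- 	s3 = s3 - 1529
--
-- 	while True:
-- 		if s5 <= s2: break
--
-- 		char0 = char0 + char1
-- 		s4 = char0 % s3
-- 		a0 = 10
-- 		char_0 = char1
-- 		s2 = s2 + 1
-- 		char1 = s4
--
-- 	a0 = 89
-- 	a0 = char1 % a0
-- 	a0 = a0 + 37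
-- 	a0 = a0 & 0xff # to remain in ASCII table
-- 	return a0
-- ===== SOURCE B (Python) =====
-- def decrypt_char(char0, char1):
--     # After the first loop step the pair is (c, c % m) and each further step doubles c mod m,
--     # so the char0**2 - 7 iterations collapse to one modular exponentiation.
--     m = 0x3b9ad - 1529
--     n = char0 * char0 - 7
--     if n > 0:
--         char1 = (char0 + char1) * pow(2, n - 1, m) % m
--     return (char1 % 89 + 37) & 0xff
-- ===== Notes on version B (the rewrite author's own statement) =====
-- stated objective: faster
-- what changed: B replaces the char0^2-iteration additive-doubling loop by a single modular exponentiation pow(2, char0^2-8, 242612) applied to char0+char1.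
import Mathlib
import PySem

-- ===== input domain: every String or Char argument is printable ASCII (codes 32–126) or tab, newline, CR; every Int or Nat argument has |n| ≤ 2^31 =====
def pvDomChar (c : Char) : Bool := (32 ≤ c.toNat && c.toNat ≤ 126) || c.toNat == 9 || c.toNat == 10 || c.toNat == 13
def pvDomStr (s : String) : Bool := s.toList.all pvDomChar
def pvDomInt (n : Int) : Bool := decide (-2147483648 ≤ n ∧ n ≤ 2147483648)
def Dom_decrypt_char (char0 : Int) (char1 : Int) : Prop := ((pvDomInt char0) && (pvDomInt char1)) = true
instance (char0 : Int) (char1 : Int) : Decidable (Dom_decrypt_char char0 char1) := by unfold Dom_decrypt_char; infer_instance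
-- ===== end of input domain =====

-- B collapses A's char0^2-iteration doubling loop into one modular exponentiation (objective: faster, asymptotic).

-- ===== PORT A =====
-- A's while loop: state (s2, char0, char1); s4/a0/char_0 are dead or immediately overwritten.
def decryptLoop (s5 s2 char0 char1 s3 : Int) : Int :=
  if s5 ≤ s2 then char1
  else decryptLoop s5 (s2 + 1) (char0 + char1) (PySem.Int.mod (char0 + char1) s3) s3
termination_by (s5 - s2).toNat
decreasing_by omega

def decrypt_char (char0 : Int) (char1 : Int) : Int :=
  let s3 : Int := 0x3b9ad - 1529
  let s5 : Int := char0 ^ 2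
  let c1 := decryptLoop s5 7 char0 char1 s3
  PySem.Int.band (PySem.Int.mod c1 89 + 37) 0xff

-- ===== PORT B =====
def decrypt_char_alt (char0 : Int) (char1 : Int) : Int :=
  let m : Int := 0x3b9ad - 1529
  let n : Int := char0 * char0 - 7
  let c1 : Int :=
    if n > 0 then PySem.Int.mod ((char0 + char1) * PySem.Int.powMod 2 (n - 1).toNat m) m
    else char1
  PySem.Int.band (PySem.Int.mod c1 89 + 37) 0xff

-- ===== PRECONDITION & SPEC =====
def Spec_decrypt_char (char0 : Int) (char1 : Int) (out : Int) : Prop := out = decrypt_char_alt char0 char1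
instance (char0 : Int) (char1 : Int) (out : Int) : Decidable (Spec_decrypt_char char0 char1 out) := by unfold Spec_decrypt_char; infer_instance

-- ===== CLAIM (what is proved, stated in full; the proofs are below) =====
def Claim_equal_decrypt_char : Prop := ∀ (char0 : Int) (char1 : Int), Dom_decrypt_char char0 char1 → Spec_decrypt_char char0 char1 (decrypt_char char0 char1)

-- ===== LEMMAS AND PROOFS =====

-- Once the loop state has the shape (c, c % m), each iteration doubles c modulo m.
theorem decryptLoop_inv (m : Int) (hm : 0 < m) (s5 : Int) :
    ∀ (n : Nat) (s2 c : Int), (s5 - s2).toNat = n →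
      decryptLoop s5 s2 c (PySem.Int.mod c m) m = PySem.Int.mod (2 ^ n * c) m := by
  intro n
  induction n with
  | zero =>
    intro s2 c hn
    rw [decryptLoop]
    simp only [if_pos (by omega : s5 ≤ s2)]
    rw [pow_zero, one_mul]
  | succ k ih =>
    intro s2 c hn
    rw [decryptLoop]
    simp only [if_neg (by omega : ¬ s5 ≤ s2)]
    rw [ih (s2 + 1) (c + PySem.Int.mod c m) (by omega)]
    rw [PySem.Int.mod_eq_emod_of_pos hm, PySem.Int.mod_eq_emod_of_pos hm,
        PySem.Int.mod_eq_emod_of_pos hm]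
    have h : (c + c % m) % m = (c + c) % m :=
      Int.ModEq.add_left c (Int.emod_emod_of_dvd c dvd_rfl)
    have h2 : (2 ^ k * (c + c % m)) % m = (2 ^ k * (c + c)) % m :=
      Int.ModEq.mul_left (2 ^ k) h
    rw [h2]
    ring_nf

theorem decrypt_char_eq (char0 char1 : Int) :
    decrypt_char char0 char1 = decrypt_char_alt char0 char1 := by
  unfold decrypt_char decrypt_char_alt
  have hm : (0 : Int) < 0x3b9ad - 1529 := by norm_num
  have hsq : char0 ^ 2 = char0 * char0 := sq char0
  by_cases h : char0 * char0 - 7 > 0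
  · simp only [if_pos h]
    rw [hsq, decryptLoop]
    simp only [if_neg (by omega : ¬ char0 * char0 ≤ 7)]
    rw [decryptLoop_inv _ hm _ (char0 * char0 - 8).toNat _ _ (by omega)]
    rw [PySem.Int.powMod_eq_emod 2 _ hm,
        PySem.Int.mod_eq_emod_of_pos hm, PySem.Int.mod_eq_emod_of_pos hm]
    have : ((char0 + char1) * (2 ^ (char0 * char0 - 7 - 1).toNat % (0x3b9ad - 1529))) %
        (0x3b9ad - 1529) = ((char0 + char1) * 2 ^ (char0 * char0 - 7 - 1).toNat) %
        (0x3b9ad - 1529) := Int.ModEq.mul_left _ (Int.emod_emod_of_dvd _ dvd_rfl)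
    rw [this, mul_comm (char0 + char1),
        show (char0 * char0 - 7 - 1).toNat = (char0 * char0 - 8).toNat from by omega]
  · simp only [if_neg h]
    rw [hsq, decryptLoop]
    simp only [if_pos (by omega : char0 * char0 ≤ 7)]

-- ===== VERDICT (by name: the statement is the Claim_ definition above) =====
theorem decrypt_char_spec : Claim_equal_decrypt_char := by
  intro char0 char1 _
  exact decrypt_char_eq char0 char1
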